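-- pv_equiv track=rewrite | github.com/ykxVK8yL5L/browserflow | backend/core/node_handlers/browser.py | _find_text_sequence_match
-- ===== SOURCE A (Python) =====
-- from typing import Any
--
-- def _normalize_text_for_match(value: Any) -> str:
--     text = str(value or "")
--     return "".join(text.split()).lower()
--
-- def _find_text_sequence_match(
--     candidates: list[dict[str, Any]],
--     target_text: str,
-- ) -> list[dict[str, Any]]:
--     normalized_target = _normalize_text_for_match(target_text)
--     if not normalized_target:
--         return []
--
--     exact_matches = [
--         item
--         for item in candidates
--         if _normalize_text_for_match(item.get("text")) == normalized_target
--     ]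
--     if exact_matches:
--         return [exact_matches[0]]
--
--     count = len(candidates)
--     for start in range(count):
--         merged = ""
--         matched_items: list[dict[str, Any]] = []
--         for index in range(start, count):
--             current_text = _normalize_text_for_match(candidates[index].get("text"))
--             if not current_text:
--                 continue
--             merged += current_text
--             matched_items.append(candidates[index])
--
--             if merged == normalized_target:
--                 return matched_items
--             if not normalized_target.startswith(merged):
--                 break
--
--     partial_matches = [
--         item
--         for item in candidates
--         if normalized_target in _normalize_text_for_match(item.get("text"))
--         or _normalize_text_for_match(item.get("text")) in normalized_target
--     ]
--     return [partial_matches[0]] if partial_matches else []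
-- ===== SOURCE B (Python) =====
-- def _normalize_text_for_match(value):
--     text = str(value or "")
--     return "".join(text.split()).lower()
--
--
-- def _find_text_sequence_match(candidates, target_text):
--     tgt = _normalize_text_for_match(target_text)
--     if not tgt:
--         return []
--
--     norms = [_normalize_text_for_match(c.get("text")) for c in candidates]
--
--     exact = next((c for c, n in zip(candidates, norms) if n == tgt), None)
--     if exact is not None:
--         return [exact]
--
--     # boundary-aligned occurrence search: concatenate all non-empty normalized
--     # texts into one haystack, record each chunk's start offset, and look for a
--     # position where the target occurs starting AND ending on chunk boundaries.
--     items = [(c, n) for c, n in zip(candidates, norms) if n]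
--     big = "".join(n for _, n in items)
--     starts = []
--     off = 0
--     for _, n in items:
--         starts.append(off)
--         off += len(n)
--     starts.append(off)
--     boundary_index = {p: i for i, p in enumerate(starts)}
--
--     L = len(tgt)
--     for i, p in enumerate(starts[:-1]):
--         if big[p:p + L] == tgt:
--             j = boundary_index.get(p + L)
--             if j is not None:
--                 return [c for c, _ in items[i:j]]
--
--     partial = next((c for c, n in zip(candidates, norms) if tgt in n or n in tgt), None)
--     return [partial] if partial is not None else []
-- ===== Notes on version B (the rewrite author's own statement) =====
-- stated objective: faster
-- what changed: B replaces A's nested start/extend loop (which re-normalizes and re-concatenates a growing merged string per start index) by a boundary-aligned substring search: it joins all non-empty normalized texts once into a single haystack, records each chunk's start offset plus an offset->index table, and returns the first position where the target occurs starting and ending on chunk boundaries.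
import Mathlib
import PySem

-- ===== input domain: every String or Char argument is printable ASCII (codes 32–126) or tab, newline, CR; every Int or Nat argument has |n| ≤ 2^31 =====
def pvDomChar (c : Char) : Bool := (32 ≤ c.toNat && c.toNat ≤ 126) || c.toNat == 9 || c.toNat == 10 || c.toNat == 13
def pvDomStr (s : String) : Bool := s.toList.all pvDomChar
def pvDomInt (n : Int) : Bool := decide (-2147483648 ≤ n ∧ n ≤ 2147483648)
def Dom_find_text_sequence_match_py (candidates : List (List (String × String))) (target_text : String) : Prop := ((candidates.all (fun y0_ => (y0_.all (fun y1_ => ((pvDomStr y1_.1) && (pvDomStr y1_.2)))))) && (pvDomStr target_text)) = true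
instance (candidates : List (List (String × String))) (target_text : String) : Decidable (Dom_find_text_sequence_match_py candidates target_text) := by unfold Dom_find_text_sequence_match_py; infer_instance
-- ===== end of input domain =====

-- B replaces A's nested start/extend concatenation loop by a boundary-aligned
-- substring search over ONE concatenation of all non-empty normalized texts,
-- with an offset -> chunk-index table; objective: faster.

-- ===== PORT A =====
-- shared helper _normalize_text_for_match(value): str(value or "") = value itself for a
-- str value ("" stays ""), then "".join(text.split()).lower()
def pvNorm (value : String) : String :=
  PySem.Str.lower (PySem.Str.join "" (PySem.Str.split₀ value))

-- item.get("text") with str(None or "") = "" folded in: first-match lookup, default ""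
def pvText (item : List (String × String)) : String :=
  (PySem.Dict.mk item).getD "text" ""

-- inner loop 'for index in range(start, count)' with state (merged, matched_items);
-- 'return' = some, 'break' / falling off the loop = none ('merged += current_text' inlined)
def pvInnerA (tgt : String) (merged : String) (acc : List (List (String × String))) :
    List (List (String × String)) → Option (List (List (String × String)))
  | [] => none
  | c :: rest =>
    if pvNorm (pvText c) = "" then pvInnerA tgt merged acc rest
    else if merged ++ pvNorm (pvText c) = tgt then some (acc ++ [c])
    else if PySem.Str.startswith tgt (merged ++ pvNorm (pvText c)) then
      pvInnerA tgt (merged ++ pvNorm (pvText c)) (acc ++ [c]) rest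
    else none

-- outer loop 'for start in range(count)': try each start index (= each suffix)
def pvOuterA (tgt : String) :
    List (List (String × String)) → Option (List (List (String × String)))
  | [] => none
  | c :: rest =>
    match pvInnerA tgt "" [] (c :: rest) with
    | some r => some r
    | none => pvOuterA tgt rest

def find_text_sequence_match_py (candidates : List (List (String × String))) (target_text : String) : List (List (String × String)) :=
  if pvNorm target_text = "" then []
  else
    match candidates.filter (fun item => pvNorm (pvText item) == pvNorm target_text) with
    | e :: _ => [e]
    | [] =>
      match pvOuterA (pvNorm target_text) candidates with
      | some r => r
      | none =>
        match candidates.filter (fun item =>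
            PySem.Str.isIn (pvNorm target_text) (pvNorm (pvText item)) ||
            PySem.Str.isIn (pvNorm (pvText item)) (pvNorm target_text)) with
        | p :: _ => [p]
        | [] => []

-- ===== PORT B =====
-- the 'starts' loop of Source B: starts.append(off); off += len(n); plus the final append of off
def pvStartsB : List ((List (String × String)) × String) → Int → List Int
  | [], off => [off]
  | (_, n) :: r, off => off :: pvStartsB r (off + PySem.Str.len n)

-- Source B's scan 'for i, p in enumerate(starts[:-1])': one slice comparison of big
-- at p against the whole target, then the boundary-table lookup for the end
def pvScanB (tgt big : String) (d : PySem.Dict Int Int)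
    (items : List ((List (String × String)) × String)) :
    List (Int × Int) → Option (List (List (String × String)))
  | [] => none
  | (i, p) :: rest =>
    if PySem.Str.slice big (some p) (some (p + PySem.Str.len tgt)) = tgt then
      match d.get? (p + PySem.Str.len tgt) with
      | some j => some ((PySem.List.slice items (some i) (some j)).map Prod.fst)
      | none => pvScanB tgt big d items rest
    else pvScanB tgt big d items rest

def find_text_sequence_match_py_alt (candidates : List (List (String × String))) (target_text : String) : List (List (String × String)) :=
  let tgt := pvNorm target_text
  if tgt = "" then []
  else
    let norms := candidates.map (fun c => pvNorm (pvText c))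
    match (candidates.zip norms).find? (fun p => p.2 == tgt) with
    | some p => [p.1]
    | none =>
      let items := (candidates.zip norms).filter (fun p => !(p.2 == ""))
      let big := PySem.Str.join "" (items.map (·.2))
      let starts := pvStartsB items 0
      let d := (PySem.List.enumerate starts).foldl (fun d q => d.insert q.2 q.1) PySem.Dict.empty
      match pvScanB tgt big d items (PySem.List.enumerate (PySem.List.slice starts none (some (-1)))) with
      | some r => r
      | none =>
        match (candidates.zip norms).find? (fun p =>
            PySem.Str.isIn tgt p.2 || PySem.Str.isIn p.2 tgt) with
        | some p => [p.1]
        | none => []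

-- ===== PRECONDITION & SPEC =====
def Spec_find_text_sequence_match_py (candidates : List (List (String × String))) (target_text : String) (out : List (List (String × String))) : Prop := out = find_text_sequence_match_py_alt candidates target_text
instance (candidates : List (List (String × String))) (target_text : String) (out : List (List (String × String))) : Decidable (Spec_find_text_sequence_match_py candidates target_text out) := by unfold Spec_find_text_sequence_match_py; infer_instance

-- ===== CLAIM (what is proved, stated in full; the proofs are below) =====
def Claim_equal_find_text_sequence_match_py : Prop := ∀ (candidates : List (List (String × String))) (target_text : String), Dom_find_text_sequence_match_py candidates target_text → Spec_find_text_sequence_match_py candidates target_text (find_text_sequence_match_py candidates target_text)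

-- ===== LEMMAS AND PROOFS =====

-- the (item, normalized text) pairs with non-empty normalized text (Source B's 'items')
def pvNormsOf (l : List (List (String × String))) : List ((List (String × String)) × String) :=
  (l.map (fun item => (item, pvNorm (pvText item)))).filter (fun p => !(p.2 == ""))

theorem pv_zip_map (l : List (List (String × String))) (f : List (String × String) → String) :
    l.zip (l.map f) = l.map (fun c => (c, f c)) := by
  induction l with
  | nil => rfl
  | cons a r ih => simp [ih]

def pvConsume (s : List Char) :
    List ((List (String × String)) × String) → Option (List (List (String × String)))
  | [] => none
  | (it, n) :: r =>
    if n.toList = s then some [it]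
    else if n.toList <+: s then (pvConsume (s.drop n.toList.length) r).map (it :: ·)
    else none

def pvOuterC (s : List Char) :
    List ((List (String × String)) × String) → Option (List (List (String × String)))
  | [] => none
  | p :: r =>
    match pvConsume s (p :: r) with
    | some res => some res
    | none => pvOuterC s r

def pvSumL (l : List ((List (String × String)) × String)) : Nat :=
  (l.map (fun p => p.2.toList.length)).sum

theorem pv_join_flatten (parts : List String) :
    (PySem.Str.join "" parts).toList = (parts.map String.toList).flatten := by
  have h : ∀ ps : List (List Char), PySem.Chars.join [] ps = ps.flatten := by
    intro ps
    induction ps with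
    | nil => simp [pysem]
    | cons a r ih =>
      cases r with
      | nil => simp [pysem]
      | cons b r' => rw [PySem.Chars.join_cons_cons]; simp_all [pysem]
  rw [PySem.Str.toList_join]
  simp [h]

theorem pv_innerA_consume (tgt : String) :
    ∀ (l : List (List (String × String))) (m : Nat) (merged : String)
      (acc : List (List (String × String))),
      merged.toList = tgt.toList.take m → m < tgt.toList.length →
      pvInnerA tgt merged acc l = (pvConsume (tgt.toList.drop m) (pvNormsOf l)).map (acc ++ ·) := by
  intro l
  induction l with
  | nil => intro m merged acc _ _; rfl
  | cons c rest ih =>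
    intro m merged acc hm hlt
    by_cases hcur : pvNorm (pvText c) = ""
    · have hns : pvNormsOf (c :: rest) = pvNormsOf rest := by simp [pvNormsOf, hcur]
      rw [hns, ← ih m merged acc hm hlt]
      simp only [pvInnerA, if_pos hcur]
    · have hns : pvNormsOf (c :: rest) = (c, pvNorm (pvText c)) :: pvNormsOf rest := by
        simp [pvNormsOf, hcur]
      rw [hns]
      have hEQ : (merged ++ pvNorm (pvText c) = tgt)
          ↔ (pvNorm (pvText c)).toList = tgt.toList.drop m := by
        rw [← String.toList_inj, String.toList_append, hm]
        constructor
        · intro he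
          exact List.append_cancel_left (he.trans (List.take_append_drop _ _).symm)
        · intro he; rw [he, List.take_append_drop]
      have hSW : (PySem.Str.startswith tgt (merged ++ pvNorm (pvText c)) = true)
          ↔ (pvNorm (pvText c)).toList <+: tgt.toList.drop m := by
        have h2 := List.prefix_append_right_inj (l₁ := (pvNorm (pvText c)).toList)
          (l₂ := tgt.toList.drop m) (tgt.toList.take m)
        rw [List.take_append_drop] at h2
        rw [PySem.Str.startswith_eq, PySem.Chars.startswith_iff, String.toList_append, hm, h2]
      by_cases heq : merged ++ pvNorm (pvText c) = tgt
      · simp only [pvInnerA, if_neg hcur, if_pos heq, pvConsume, if_pos (hEQ.mp heq),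
          Option.map_some]
      · by_cases hpre : (pvNorm (pvText c)).toList <+: tgt.toList.drop m
        · have hneqs : ¬ (pvNorm (pvText c)).toList = tgt.toList.drop m :=
            fun h => heq (hEQ.mpr h)
          have hnlen : 0 < (pvNorm (pvText c)).toList.length := by
            cases hh : (pvNorm (pvText c)).toList with
            | nil => exact absurd (String.toList_inj.mp (by simpa using hh)) hcur
            | cons a b => simp
          have hlen_lt : (pvNorm (pvText c)).toList.length < (tgt.toList.drop m).length :=
            lt_of_le_of_ne hpre.length_le (fun h => hneqs (hpre.eq_of_length h))
          have htake : (tgt.toList.drop m).take (pvNorm (pvText c)).toList.length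
              = (pvNorm (pvText c)).toList := (List.prefix_iff_eq_take.mp hpre).symm
          have hm' : (merged ++ pvNorm (pvText c)).toList
              = tgt.toList.take (m + (pvNorm (pvText c)).toList.length) := by
            rw [String.toList_append, hm, List.take_add, htake]
          have hlt' : m + (pvNorm (pvText c)).toList.length < tgt.toList.length := by
            rw [List.length_drop] at hlen_lt; omega
          have hdrop : tgt.toList.drop (m + (pvNorm (pvText c)).toList.length)
              = (tgt.toList.drop m).drop (pvNorm (pvText c)).toList.length := by
            rw [List.drop_drop]
          have hrec := ih (m + (pvNorm (pvText c)).toList.length)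
            (merged ++ pvNorm (pvText c)) (acc ++ [c]) hm' hlt'
          rw [hdrop] at hrec
          have hsw : PySem.Str.startswith tgt (merged ++ pvNorm (pvText c)) = true :=
            hSW.mpr hpre
          have hfun : (fun x => (acc ++ [c]) ++ x)
              = ((fun x => acc ++ x) ∘ (fun x => c :: x)) := funext fun x => by simp
          simp only [pvInnerA, if_neg hcur, if_neg heq, hsw, if_pos, pvConsume,
            if_neg hneqs, if_pos hpre, Option.map_map]
          rw [hrec, hfun]
        · have hneqs : ¬ (pvNorm (pvText c)).toList = tgt.toList.drop m :=
            fun h => hpre (h ▸ List.prefix_refl _)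
          have hsw : ¬ PySem.Str.startswith tgt (merged ++ pvNorm (pvText c)) = true :=
            fun h => hpre (hSW.mp h)
          have hswf : PySem.Str.startswith tgt (merged ++ pvNorm (pvText c)) = false :=
            Bool.eq_false_iff.mpr hsw
          simp only [pvInnerA, if_neg hcur, if_neg heq, hswf, Bool.false_eq_true, if_false,
            pvConsume, if_neg hneqs, if_neg hpre, Option.map_none]

theorem pv_outerA_outerC (tgt : String) (h : tgt.toList ≠ []) :
    ∀ l : List (List (String × String)),
    pvOuterA tgt l = pvOuterC tgt.toList (pvNormsOf l) := by
  intro l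
  have hlen : 0 < tgt.toList.length := List.length_pos_iff.mpr h
  induction l with
  | nil => rfl
  | cons c rest ih =>
    have hinner : pvInnerA tgt "" [] (c :: rest)
        = pvConsume tgt.toList (pvNormsOf (c :: rest)) := by
      have := pv_innerA_consume tgt (c :: rest) 0 "" [] (by simp) hlen
      simpa using this
    by_cases hcur : pvNorm (pvText c) = ""
    · have hns : pvNormsOf (c :: rest) = pvNormsOf rest := by simp [pvNormsOf, hcur]
      rw [hns] at hinner
      have hskip : pvInnerA tgt "" [] (c :: rest) = pvInnerA tgt "" [] rest := by
        simp only [pvInnerA, if_pos hcur]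
      rw [hskip] at hinner
      rw [hns, ← ih]
      cases rest with
      | nil =>
        have h0 : pvInnerA tgt "" [] [c] = none := by rw [hskip]; rfl
        simp only [pvOuterA, h0]
      | cons d rest' =>
        cases hin : pvInnerA tgt "" [] (d :: rest') with
        | some r => simp only [pvOuterA, hskip, hin]
        | none => simp only [pvOuterA, hskip, hin]
    · have hns : pvNormsOf (c :: rest) = (c, pvNorm (pvText c)) :: pvNormsOf rest := by
        simp [pvNormsOf, hcur]
      rw [hns] at hinner
      cases hin : pvConsume tgt.toList ((c, pvNorm (pvText c)) :: pvNormsOf rest) with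
      | some r => simp only [pvOuterA, pvOuterC, hns, hinner, hin]
      | none => simp only [pvOuterA, pvOuterC, hns, hinner, hin, ih]

theorem pv_flatten_nil_iff (l : List ((List (String × String)) × String))
    (hne : ∀ p ∈ l, p.2.toList ≠ []) :
    (l.map (fun p => p.2.toList)).flatten = [] ↔ l = [] := by
  cases l with
  | nil => simp
  | cons a r =>
    simp only [List.map_cons, List.flatten_cons, List.append_eq_nil_iff]
    constructor
    · rintro ⟨h1, _⟩; exact absurd h1 (hne a (by simp))
    · intro h; cases h

theorem pv_consume_some_iff :
    ∀ (l : List ((List (String × String)) × String)) (s : List Char),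
    (∀ p ∈ l, p.2.toList ≠ []) → ∀ (res : List (List (String × String))),
    (pvConsume s l = some res ↔
      ∃ k, 0 < k ∧ k ≤ l.length ∧ ((l.take k).map (fun p => p.2.toList)).flatten = s ∧
        res = (l.take k).map Prod.fst) := by
  intro l
  induction l with
  | nil =>
    intro s _ res
    simp only [pvConsume, List.length_nil]
    constructor
    · intro h; cases h
    · rintro ⟨k, hk, hk0, _⟩; omega
  | cons a r ihl =>
    intro s hne res
    obtain ⟨it, n⟩ := a
    by_cases h1 : n.toList = s
    · simp only [pvConsume, if_pos h1]
      constructor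
      · intro h
        refine ⟨1, by omega, by simp, ?_, ?_⟩
        · simp [h1]
        · simp [← Option.some_inj.mp h]
      · rintro ⟨k, hk0, hkle, hflat, hres⟩
        cases k with
        | zero => omega
        | succ m =>
          have hrm : r.take m = [] := by
            rw [List.take_succ_cons, List.map_cons, List.flatten_cons, ← h1] at hflat
            have : ((r.take m).map (fun p => p.2.toList)).flatten = [] := by
              have h' : n.toList ++ ((r.take m).map (fun p => p.2.toList)).flatten
                  = n.toList ++ [] := by simpa using hflat
              exact List.append_cancel_left h'
            exact (pv_flatten_nil_iff (r.take m)
              (fun p hp => hne p (List.mem_cons_of_mem _ (List.mem_of_mem_take hp)))).mp this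
          rw [List.take_succ_cons, hrm] at hres
          simp [hres]
    · by_cases h2 : n.toList <+: s
      · have hnnil : n.toList ≠ [] := hne (it, n) (by simp)
        have hslen : n.toList.length < s.length := by
          have hle := h2.length_le
          rcases lt_or_eq_of_le hle with h | h
          · exact h
          · exact absurd (h2.eq_of_length h) h1
        have hsdec : s = n.toList ++ s.drop n.toList.length := by
          conv_lhs => rw [← List.take_append_drop n.toList.length s]
          rw [← List.prefix_iff_eq_take.mp h2]
        simp only [pvConsume, if_neg h1, if_pos h2]
        have ihr := ihl (s.drop n.toList.length)
          (fun p hp => hne p (List.mem_cons_of_mem _ hp))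
        constructor
        · intro h
          obtain ⟨res', hres', hmap⟩ := Option.map_eq_some_iff.mp h
          obtain ⟨k, hk0, hkle, hflat, hres⟩ := (ihr res').mp hres'
          refine ⟨k + 1, by omega, by simp; omega, ?_, ?_⟩
          · rw [List.take_succ_cons, List.map_cons, List.flatten_cons, hflat, ← hsdec]
          · rw [List.take_succ_cons, List.map_cons, ← hmap, hres]
        · rintro ⟨k, hk0, hkle, hflat, hres⟩
          cases k with
          | zero => omega
          | succ m =>
            rw [List.take_succ_cons, List.map_cons, List.flatten_cons] at hflat
            have hm0 : 0 < m := by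
              rcases Nat.eq_zero_or_pos m with h | h
              · subst h
                simp at hflat
                exact absurd hflat h1
              · exact h
            have hflat' : ((r.take m).map (fun p => p.2.toList)).flatten
                = s.drop n.toList.length := by
              have h' : n.toList ++ ((r.take m).map (fun p => p.2.toList)).flatten
                  = n.toList ++ s.drop n.toList.length := by
                simpa using hflat.trans hsdec
              exact List.append_cancel_left h'
            have : pvConsume (s.drop n.toList.length) r = some ((r.take m).map Prod.fst) :=
              (ihr _).mpr ⟨m, hm0, by simpa using hkle, hflat', rfl⟩
            rw [this]
            rw [List.take_succ_cons, List.map_cons] at hres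
            simp [hres]
      · simp only [pvConsume, if_neg h1, if_neg h2]
        constructor
        · intro h; cases h
        · rintro ⟨k, hk0, hkle, hflat, hres⟩
          cases k with
          | zero => omega
          | succ m =>
            rw [List.take_succ_cons, List.map_cons, List.flatten_cons] at hflat
            exact absurd (hflat ▸ List.prefix_append n.toList _) h2

theorem pv_startsB_ne_nil (l : List ((List (String × String)) × String)) (off : Int) :
    pvStartsB l off ≠ [] := by
  cases l with
  | nil => simp [pvStartsB]
  | cons a r => obtain ⟨it, n⟩ := a; simp [pvStartsB]

theorem pv_startsB_length (l : List ((List (String × String)) × String)) :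
    ∀ off : Int, (pvStartsB l off).length = l.length + 1 := by
  induction l with
  | nil => intro off; rfl
  | cons a r ih => obtain ⟨it, n⟩ := a; intro off; simp [pvStartsB, ih]

theorem pv_startsB_get (l : List ((List (String × String)) × String)) :
    ∀ (off : Int) (k : Nat), k ≤ l.length →
      (pvStartsB l off)[k]? = some (off + (pvSumL (l.take k) : Int)) := by
  induction l with
  | nil =>
    intro off k hk
    have : k = 0 := by simpa using hk
    subst this
    simp [pvStartsB, pvSumL]
  | cons a r ih =>
    obtain ⟨it, n⟩ := a
    intro off k hk
    cases k with
    | zero => simp [pvStartsB, pvSumL]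
    | succ m =>
      have h := ih (off + PySem.Str.len n) m (by simpa using hk)
      simp only [pvStartsB, List.getElem?_cons_succ]
      rw [h]
      congr 1
      simp only [pvSumL, List.take_succ_cons, List.map_cons, List.sum_cons, PySem.Str.len_eq]
      push_cast
      ring

theorem pv_startsB_lb (l : List ((List (String × String)) × String)) :
    ∀ (off : Int) (x : Int), x ∈ pvStartsB l off → off ≤ x := by
  induction l with
  | nil => intro off x hx; simp [pvStartsB] at hx; omega
  | cons a r ih =>
    obtain ⟨it, n⟩ := a
    intro off x hx
    simp only [pvStartsB, List.mem_cons] at hx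
    rcases hx with h | h
    · omega
    · have := ih (off + PySem.Str.len n) x h
      have hlen : (0 : Int) ≤ PySem.Str.len n := by rw [PySem.Str.len_eq]; positivity
      omega

theorem pv_startsB_pairwise (l : List ((List (String × String)) × String))
    (hne : ∀ p ∈ l, p.2.toList ≠ []) :
    ∀ off : Int, (pvStartsB l off).Pairwise (· < ·) := by
  induction l with
  | nil => intro off; simp [pvStartsB]
  | cons a r ih =>
    obtain ⟨it, n⟩ := a
    intro off
    simp only [pvStartsB, List.pairwise_cons]
    constructor
    · intro x hx
      have hlb := pv_startsB_lb r (off + PySem.Str.len n) x hx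
      have hpos : (0 : Int) < PySem.Str.len n := by
        rw [PySem.Str.len_eq]
        have : n.toList ≠ [] := hne (it, n) (by simp)
        have := List.length_pos_iff.mpr this
        omega
      omega
    · exact ih (fun p hp => hne p (List.mem_cons_of_mem _ hp)) _

theorem pv_startsB_nodup (l : List ((List (String × String)) × String))
    (hne : ∀ p ∈ l, p.2.toList ≠ []) (off : Int) : (pvStartsB l off).Nodup :=
  (pv_startsB_pairwise l hne off).imp (fun h => ne_of_lt h)

theorem pv_sumL_append (a b : List ((List (String × String)) × String)) :
    pvSumL (a ++ b) = pvSumL a + pvSumL b := by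
  simp [pvSumL]


theorem pv_sumL_take_le (l : List ((List (String × String)) × String)) (a b : Nat)
    (hab : a ≤ b) : pvSumL (l.take a) ≤ pvSumL (l.take b) := by
  have hdec : l.take b = l.take a ++ (l.drop a).take (b - a) := by
    rw [← List.take_add]
    congr 1
    omega
  rw [hdec, pv_sumL_append]
  omega

theorem pv_dict_get (starts : List Int) (hnd : starts.Nodup) (q j : Int) :
    ((PySem.List.enumerate starts).foldl (fun d q => d.insert q.2 q.1)
        PySem.Dict.empty).get? q = some j ↔
      ∃ (kk : Nat) (h : kk < starts.length), q = starts[kk] ∧ j = (kk : Int) := by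
  have hsnd : (PySem.List.enumerate starts).map (·.2) = starts :=
    PySem.List.map_snd_enumerate starts 0
  have hitems : ((PySem.List.enumerate starts).foldl (fun d q => d.insert q.2 q.1)
      PySem.Dict.empty).items
      = (PySem.List.enumerate starts).map (fun a => (a.2, a.1)) := by
    have := PySem.Dict.items_foldl_insert_fresh (l := PySem.List.enumerate starts)
      (k := fun a => a.2) (v := fun a => a.1) (d := PySem.Dict.empty)
      (by intro a _; simp) (by rw [hsnd]; exact hnd)
    simpa using this
  have hkeys : ((PySem.List.enumerate starts).foldl (fun d q => d.insert q.2 q.1)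
      PySem.Dict.empty).keys.Nodup := by
    show (((PySem.List.enumerate starts).foldl (fun d q => d.insert q.2 q.1)
      PySem.Dict.empty).items.map (·.1)).Nodup
    rw [hitems, List.map_map]
    simpa [Function.comp_def] using (hsnd ▸ hnd)
  rw [PySem.Dict.get?_eq_some_iff_mem_items _ _ _ hkeys, hitems]
  constructor
  · intro h
    obtain ⟨a, ha, hqa⟩ := List.mem_map.mp h
    obtain ⟨k, hk, hak⟩ := (PySem.List.mem_enumerate_iff _ _ _).mp ha
    rw [hak] at hqa
    have h1 := congrArg Prod.fst hqa
    have h2 := congrArg Prod.snd hqa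
    simp at h1 h2
    exact ⟨k, hk, h1.symm, by omega⟩
  · rintro ⟨kk, hk, hq, hj⟩
    refine List.mem_map.mpr ⟨((kk : Int), starts[kk]), ?_, ?_⟩
    · exact (PySem.List.mem_enumerate_iff _ _ _).mpr ⟨kk, hk, by simp⟩
    · simp [hq, hj]

theorem pv_sumL_eq_length_flatten (l : List ((List (String × String)) × String)) :
    pvSumL l = ((l.map (fun p => p.2.toList)).flatten).length := by
  rw [List.length_flatten, List.map_map]
  rfl

theorem pv_scan_suffix (tgt : String) (items : List ((List (String × String)) × String))
    (hs : tgt.toList ≠ []) (hne : ∀ p ∈ items, p.2.toList ≠ []) :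
    ∀ (post pre : List ((List (String × String)) × String)), items = pre ++ post →
      pvScanB tgt (PySem.Str.join "" (items.map (·.2)))
        ((PySem.List.enumerate (pvStartsB items 0)).foldl (fun d q => d.insert q.2 q.1) PySem.Dict.empty)
        items (PySem.List.enumerate ((pvStartsB post ((pvSumL pre : Nat) : Int)).dropLast) ((pre.length : Nat) : Int))
      = pvOuterC tgt.toList post := by
  have hL : 0 < tgt.toList.length := List.length_pos_iff.mpr hs
  have hbig : (PySem.Str.join "" (items.map (·.2))).toList
      = (items.map (fun p => p.2.toList)).flatten := by
    rw [pv_join_flatten, List.map_map]; rfl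
  have hndstarts : (pvStartsB items 0).Nodup := pv_startsB_nodup items hne 0
  intro post
  induction post with
  | nil =>
    intro pre hitems
    simp [pvStartsB, PySem.List.enumerate_nil, pvScanB, pvOuterC]
  | cons a r ih =>
    obtain ⟨it, n⟩ := a
    intro pre hitems
    have hnepost : ∀ p ∈ (it, n) :: r, p.2.toList ≠ [] :=
      fun p hp => hne p (hitems ▸ List.mem_append_right _ hp)
    -- peel the head of the enumerated starts list
    rw [show pvStartsB ((it, n) :: r) ((pvSumL pre : Nat) : Int)
          = ((pvSumL pre : Nat) : Int)
            :: pvStartsB r (((pvSumL pre : Nat) : Int) + PySem.Str.len n) from rfl,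
        List.dropLast_cons_of_ne_nil (pv_startsB_ne_nil _ _),
        PySem.List.enumerate_cons]
    -- the head step of pvScanB
    show (if PySem.Str.slice (PySem.Str.join "" (items.map (·.2)))
            (some ((pvSumL pre : Nat) : Int))
            (some (((pvSumL pre : Nat) : Int) + PySem.Str.len tgt))
          = tgt then _ else _) = _
    -- translate the slice condition
    have hflatdec : (items.map (fun p => p.2.toList)).flatten
        = (pre.map (fun p => p.2.toList)).flatten
          ++ ((((it, n) :: r).map (fun p => p.2.toList)).flatten) := by
      rw [hitems, List.map_append, List.flatten_append]
    have hprelen : ((pre.map (fun p => p.2.toList)).flatten).length = pvSumL pre :=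
      (pv_sumL_eq_length_flatten pre).symm
    have hdropbig : (PySem.Str.join "" (items.map (·.2))).toList.drop (pvSumL pre)
        = (((it, n) :: r).map (fun p => p.2.toList)).flatten := by
      rw [hbig, hflatdec, List.drop_left' hprelen]
    have hC1 : (PySem.Str.slice (PySem.Str.join "" (items.map (·.2)))
            (some ((pvSumL pre : Nat) : Int))
            (some (((pvSumL pre : Nat) : Int) + PySem.Str.len tgt)) = tgt)
        ↔ ((((it, n) :: r).map (fun p => p.2.toList)).flatten).take tgt.toList.length
            = tgt.toList := by
      rw [← String.toList_inj, PySem.Str.toList_slice, PySem.Chars.slice_eq_listSlice,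
        PySem.Str.len_eq, PySem.List.slice_natCast_add, hdropbig]
    have hlenitems : items.length = pre.length + (r.length + 1) := by
      rw [hitems]; simp
    cases hv : pvConsume tgt.toList ((it, n) :: r) with
    | some res =>
      obtain ⟨k, hk0, hkle, hflat, hres⟩ :=
        (pv_consume_some_iff ((it, n) :: r) tgt.toList hnepost res).mp hv
      -- the slice condition holds
      have hsplit : (((it, n) :: r).map (fun p => p.2.toList)).flatten
          = ((((it, n) :: r).take k).map (fun p => p.2.toList)).flatten
            ++ ((((it, n) :: r).drop k).map (fun p => p.2.toList)).flatten := by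
        conv_lhs => rw [← List.take_append_drop k ((it, n) :: r)]
        rw [List.map_append, List.flatten_append]
      have htake : ((((it, n) :: r).map (fun p => p.2.toList)).flatten).take tgt.toList.length
          = tgt.toList := by
        rw [hsplit, List.take_left' (by rw [hflat])]
        exact hflat
      have hcond := hC1.mpr htake
      rw [if_pos hcond]
      -- the dictionary lookup succeeds at index pre.length + k
      have hta : (pre ++ ((it, n) :: r)).take (pre.length + k)
          = pre ++ ((it, n) :: r).take k := by
        rw [List.take_add, List.take_left, List.drop_left]
      have hsum_take : pvSumL (items.take (pre.length + k)) = pvSumL pre + tgt.toList.length := by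
        rw [hitems, hta, pv_sumL_append]
        congr 1
        rw [pv_sumL_eq_length_flatten, hflat]
      have hkle' : k ≤ r.length + 1 := by simpa using hkle
      have hkk_lt : pre.length + k < (pvStartsB items 0).length := by
        rw [pv_startsB_length]; omega
      have hkk_le : pre.length + k ≤ items.length := by omega
      have hget_elem : (pvStartsB items 0)[pre.length + k]'hkk_lt
          = ((pvSumL pre : Nat) : Int) + PySem.Str.len tgt := by
        have h := pv_startsB_get items 0 (pre.length + k) hkk_le
        rw [List.getElem?_eq_getElem hkk_lt] at h
        have := Option.some_inj.mp h
        rw [this, hsum_take, PySem.Str.len_eq]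
        push_cast
        ring
      have hget : ((PySem.List.enumerate (pvStartsB items 0)).foldl
            (fun d q => d.insert q.2 q.1) PySem.Dict.empty).get?
            (((pvSumL pre : Nat) : Int) + PySem.Str.len tgt)
          = some ((pre.length + k : Nat) : Int) :=
        (pv_dict_get (pvStartsB items 0) hndstarts _ _).mpr
          ⟨pre.length + k, hkk_lt, hget_elem.symm, rfl⟩
      rw [hget]
      show some ((PySem.List.slice items (some ((pre.length : Nat) : Int))
          (some ((pre.length + k : Nat) : Int))).map Prod.fst)
        = pvOuterC tgt.toList ((it, n) :: r)
      have hslice : PySem.List.slice items (some ((pre.length : Nat) : Int))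
          (some ((pre.length + k : Nat) : Int))
          = ((it, n) :: r).take k := by
        rw [PySem.List.slice_natCast, hitems, List.drop_left]
        congr 1
        omega
      rw [hslice, ← hres]
      show _ = (match pvConsume tgt.toList ((it, n) :: r) with
        | some res => some res | none => pvOuterC tgt.toList r)
      rw [hv]
    | none =>
      -- no boundary-aligned occurrence starting at this chunk: the dict cannot hit
      have hnohit : ∀ j : Int, ((PySem.List.enumerate (pvStartsB items 0)).foldl
            (fun d q => d.insert q.2 q.1) PySem.Dict.empty).get?
            (((pvSumL pre : Nat) : Int) + PySem.Str.len tgt) = some j →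
          ¬ ((((it, n) :: r).map (fun p => p.2.toList)).flatten).take tgt.toList.length
            = tgt.toList := by
        intro j hj htake
        obtain ⟨kk, hkk, hq, hjk⟩ := (pv_dict_get (pvStartsB items 0) hndstarts _ _).mp hj
        have hkk_le : kk ≤ items.length := by
          rw [pv_startsB_length] at hkk; omega
        have hsum_kk : pvSumL (items.take kk) = pvSumL pre + tgt.toList.length := by
          have h := pv_startsB_get items 0 kk hkk_le
          rw [List.getElem?_eq_getElem hkk] at h
          have h2 := Option.some_inj.mp h
          rw [← hq, PySem.Str.len_eq] at h2
          omega
        have hkk_gt : pre.length < kk := by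
          by_contra hc
          have hc' : kk ≤ pre.length := Nat.le_of_not_lt hc
          have := pv_sumL_take_le items kk pre.length hc'
          have hpre_eq : items.take pre.length = pre := by
            rw [hitems, List.take_left]
          rw [hpre_eq, hsum_kk] at this
          omega
        set k := kk - pre.length with hkdef
        have hk0 : 0 < k := by omega
        have hkk_eq : kk = pre.length + k := by omega
        have hta : (pre ++ ((it, n) :: r)).take (pre.length + k)
            = pre ++ ((it, n) :: r).take k := by
          rw [List.take_add, List.take_left, List.drop_left]
        have hsum_k : pvSumL (((it, n) :: r).take k) = tgt.toList.length := by
          rw [hkk_eq, hitems, hta, pv_sumL_append] at hsum_kk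
          omega
        have hkle : k ≤ ((it, n) :: r).length := by
          simp only [List.length_cons]
          omega
        have hflatk : ((((it, n) :: r).take k).map (fun p => p.2.toList)).flatten
            = tgt.toList := by
          have hlenflat : ((((it, n) :: r).take k).map (fun p => p.2.toList)).flatten.length
              = tgt.toList.length := by
            rw [← pv_sumL_eq_length_flatten, hsum_k]
          have hsplit : (((it, n) :: r).map (fun p => p.2.toList)).flatten
              = ((((it, n) :: r).take k).map (fun p => p.2.toList)).flatten
                ++ ((((it, n) :: r).drop k).map (fun p => p.2.toList)).flatten := by
            conv_lhs => rw [← List.take_append_drop k ((it, n) :: r)]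
            rw [List.map_append, List.flatten_append]
          rw [hsplit, List.take_left' hlenflat] at htake
          exact htake
        exact absurd ((pv_consume_some_iff ((it, n) :: r) tgt.toList hnepost _).mpr
          ⟨k, hk0, hkle, hflatk, rfl⟩) (by rw [hv]; simp)
      have hitems' : items = (pre ++ [(it, n)]) ++ r := by rw [hitems]; simp
      have e1 : ((pvSumL pre : Nat) : Int) + PySem.Str.len n
          = ((pvSumL (pre ++ [(it, n)]) : Nat) : Int) := by
        rw [pv_sumL_append, PySem.Str.len_eq]
        push_cast
        simp [pvSumL]
      have e2 : ((pre.length : Nat) : Int) + 1 = (((pre ++ [(it, n)]).length : Nat) : Int) := by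
        simp
      have hrec : pvScanB tgt (PySem.Str.join "" (items.map (·.2)))
            ((PySem.List.enumerate (pvStartsB items 0)).foldl (fun d q => d.insert q.2 q.1)
              PySem.Dict.empty) items
            (PySem.List.enumerate
              ((pvStartsB r (((pvSumL pre : Nat) : Int) + PySem.Str.len n)).dropLast)
              (((pre.length : Nat) : Int) + 1))
          = pvOuterC tgt.toList r := by
        rw [e1, e2]
        exact ih (pre ++ [(it, n)]) hitems'
      have hrhs : pvOuterC tgt.toList ((it, n) :: r) = pvOuterC tgt.toList r := by
        show (match pvConsume tgt.toList ((it, n) :: r) with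
          | some res => some res | none => pvOuterC tgt.toList r) = _
        rw [hv]
      rw [hrhs]
      by_cases hcnd : PySem.Str.slice (PySem.Str.join "" (items.map (·.2)))
          (some ((pvSumL pre : Nat) : Int))
          (some (((pvSumL pre : Nat) : Int) + PySem.Str.len tgt)) = tgt
      · rw [if_pos hcnd]
        cases hgj : ((PySem.List.enumerate (pvStartsB items 0)).foldl
            (fun d q => d.insert q.2 q.1) PySem.Dict.empty).get?
            (((pvSumL pre : Nat) : Int) + PySem.Str.len tgt) with
        | some j => exact absurd (hC1.mp hcnd) (hnohit j hgj)
        | none => exact hrec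
      · rw [if_neg hcnd]
        exact hrec

theorem pv_main (candidates : List (List (String × String))) (target_text : String) :
    find_text_sequence_match_py candidates target_text
      = find_text_sequence_match_py_alt candidates target_text := by
  unfold find_text_sequence_match_py find_text_sequence_match_py_alt
  by_cases h : pvNorm target_text = ""
  · simp [h]
  · simp only [if_neg h]
    rw [pv_zip_map candidates (fun c => pvNorm (pvText c)), List.find?_map,
      ← List.head?_filter]
    have htl : (pvNorm target_text).toList ≠ [] := by
      intro hh
      exact h (String.toList_inj.mp (by simpa using hh))
    cases hfe : candidates.filter (fun item => pvNorm (pvText item) == pvNorm target_text) with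
    | cons e es => simp [Function.comp_def, hfe]
    | nil =>
      simp only [Function.comp_def, hfe, List.head?_nil, Option.map_none]
      have hne : ∀ p ∈ pvNormsOf candidates, p.2.toList ≠ [] := by
        intro p hp hnil
        have hmem := List.of_mem_filter hp
        simp only [Bool.not_eq_eq_eq_not, Bool.not_true, beq_eq_false_iff_ne] at hmem
        exact hmem (String.toList_inj.mp (by simpa using hnil))
      have hscan := pv_scan_suffix (pvNorm target_text) (pvNormsOf candidates) htl hne
        (pvNormsOf candidates) [] rfl
      rw [show ((pvSumL ([] : List ((List (String × String)) × String)) : Nat) : Int)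
            = (0 : Int) from rfl,
          show ((([] : List ((List (String × String)) × String)).length : Nat) : Int)
            = (0 : Int) from rfl] at hscan
      rw [pv_outerA_outerC (pvNorm target_text) htl candidates, ← hscan,
        PySem.List.slice_to_neg_one]
      rw [show (candidates.map (fun c => (c, pvNorm (pvText c)))).filter
            (fun p => !(p.2 == "")) = pvNormsOf candidates from rfl]
      cases pvScanB (pvNorm target_text)
          (PySem.Str.join "" ((pvNormsOf candidates).map (·.2)))
          ((PySem.List.enumerate (pvStartsB (pvNormsOf candidates) 0)).foldl
            (fun d q => d.insert q.2 q.1) PySem.Dict.empty)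
          (pvNormsOf candidates)
          (PySem.List.enumerate ((pvStartsB (pvNormsOf candidates) 0).dropLast) 0) with
      | some r => rfl
      | none =>
        simp only []
        rw [List.find?_map, ← List.head?_filter]
        simp only [Function.comp_def]
        cases hp : candidates.filter (fun item =>
            PySem.Str.isIn (pvNorm target_text) (pvNorm (pvText item)) ||
            PySem.Str.isIn (pvNorm (pvText item)) (pvNorm target_text)) with
        | cons p ps => rfl
        | nil => rfl

-- ===== VERDICT (by name: the statement is the Claim_ definition above) =====
theorem find_text_sequence_match_py_spec : Claim_equal_find_text_sequence_match_py := by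
  intro candidates target_text _
  exact pv_main candidates target_text
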